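-- pv_equiv track=rewrite | github.com/arknave/project-euler | python/pe443.py | fast_g
-- ===== SOURCE A (Python) =====
-- import math
--
-- def factor(x):
--     yield 1
--     yield x
--     for d in range(2, x):
--         if d * d > x:
--             break
--         if x % d == 0:
--             yield d
--             yield x // d
--
-- def adj(a, m):
--     return (m - (a % m)) % m
--
-- def single_steps(n, g):
--     return min(adj(n + 1, f) for f in factor(g - n - 1) if adj(n + 1, f) > 0)
--
-- def fast_g(cap):
--     n = 4
--     g = 13
--     while n < cap:
--         if (step := math.gcd(n + 1, g)) > 1:
--             n += 1
--             g += step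
--         else:
--             x = min(cap - n, single_steps(n, g))
--             n += x
--             g += x
--
--     return g
-- ===== SOURCE B (Python) =====
-- import math
--
-- def single_steps(n, g):
--     # least k >= 1 with gcd(n+1+k, g-n-1) > 1: for every prime p | g-n-1 the
--     # first multiple of p after n+1 is n+1 + ((-(n+1)) % p); take the closest one.
--     x = g - n - 1
--     a = n + 1
--     best = None
--     for d in range(2, math.isqrt(x) + 1):
--         if x % d == 0:
--             while x % d == 0:
--                 x //= d
--             r = (-a) % d
--             best = r if best is None or r < best else best
--     if x > 1:
--         r = (-a) % x
--         best = r if best is None or r < best else best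
--     return best
--
-- def fast_g(cap):
--     n = 4
--     g = 13
--     while n < cap:
--         if (step := math.gcd(n + 1, g)) > 1:
--             n += 1
--             g += step
--         else:
--             x = min(cap - n, single_steps(n, g))
--             n += x
--             g += x
--     return g
-- ===== Notes on version B (the rewrite author's own statement) =====
-- stated objective: alternative
-- what changed: The factor/adj helpers (enumerate all divisors of g-n-1 as pairs, take the minimum positive adjustment over them) are replaced by trial-division prime factorisation of g-n-1, taking the minimum of (-(n+1)) % p over the prime factors p only; the outer loop is unchanged.
import Mathlib
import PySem

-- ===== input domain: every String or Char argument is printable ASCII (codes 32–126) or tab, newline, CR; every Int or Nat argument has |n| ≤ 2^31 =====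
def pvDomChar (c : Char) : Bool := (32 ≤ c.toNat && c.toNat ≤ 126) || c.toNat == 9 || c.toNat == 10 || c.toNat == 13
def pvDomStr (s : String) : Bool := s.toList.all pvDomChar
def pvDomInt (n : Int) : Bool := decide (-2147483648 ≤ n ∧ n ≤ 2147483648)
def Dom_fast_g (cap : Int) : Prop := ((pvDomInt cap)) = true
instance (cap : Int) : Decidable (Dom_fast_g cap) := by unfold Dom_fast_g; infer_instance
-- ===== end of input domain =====

-- B replaces the factor/adj/min-over-divisors helper by trial-division prime
-- factorisation, taking the closest next multiple over the prime factors only;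
-- the outer loop of A is unchanged (objective: alternative).

-- ===== PORT A =====
-- for d in range(2, x): break when d*d > x; yield d, x//d when x % d == 0.
-- The break is realised by bounding the range at the break point: the loop body
-- runs for exactly d = 2 .. min(x-1, isqrt(x)), the same tests in the same order.
def pvFactor (x : Int) : List Int :=
  1 :: x :: (List.range' 2 ((min (x - 1) ((x.toNat.sqrt : Int)) - 1).toNat)).flatMap
    (fun (d : Nat) => if PySem.Int.mod x (d : Int) = 0 then
      [(d : Int), PySem.Int.floordiv x (d : Int)] else [])

def pvAdj (a m : Int) : Int := PySem.Int.mod (m - PySem.Int.mod a m) m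

-- min(adj(n+1,f) for f in factor(g-n-1) if adj(n+1,f) > 0); `.getD 0` is only the
-- totalisation of Python's ValueError on an empty generator (unreachable from fast_g)
def pvSingleSteps (n g : Int) : Int :=
  (PySem.List.min?
    (((pvFactor (g - n - 1)).map (fun f => pvAdj (n + 1) f)).filter (fun v => decide (0 < v)))
    (fun v => v)).getD 0

-- while n < cap, fuelled (each reachable iteration increases n by at least 1, so
-- fuel cap.toNat + 1 is never exhausted on reachable states)
def pvLoopA (cap : Int) (fuel : Nat) (n g : Int) : Int :=
  match fuel with
  | 0 => g
  | fuel + 1 =>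
    if n < cap then
      let step : Int := (Int.gcd (n + 1) g : Int)
      if 1 < step then pvLoopA cap fuel (n + 1) (g + step)
      else
        let x := min (cap - n) (pvSingleSteps n g)
        pvLoopA cap fuel (n + x) (g + x)
    else g

def fast_g (cap : Int) : Int := pvLoopA cap (cap.toNat + 1) 4 13

-- ===== PORT B =====
-- best = r if best is None or r < best else best
def pvUpd (b : Option Int) (r : Int) : Option Int :=
  match b with
  | none => some r
  | some v => if r < v then some r else some v

theorem pvStrip_dec (x d : Int) (h : PySem.Int.mod x d = 0 ∧ 2 ≤ d ∧ 0 < x) :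
    (PySem.Int.floordiv x d).toNat < x.toNat := by
  obtain ⟨h0, hd, hx⟩ := h
  rw [PySem.Int.mod_eq_emod_of_pos (by omega)] at h0
  obtain ⟨c, hc⟩ := Int.dvd_of_emod_eq_zero h0
  rw [PySem.Int.floordiv_eq_ediv_of_pos (by omega), hc,
    Int.mul_ediv_cancel_left _ (by omega)]
  have hc0 : 0 ≤ c := by nlinarith
  have hcx : c < x := by nlinarith
  omega

-- while x % d == 0: x //= d   (the d ≥ 2, x > 0 conjuncts only make the loop total;
-- they hold whenever fast_g reaches this loop)
def pvStrip (x d : Int) : Int :=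
  if h : PySem.Int.mod x d = 0 ∧ 2 ≤ d ∧ 0 < x then pvStrip (PySem.Int.floordiv x d) d
  else x
termination_by x.toNat
decreasing_by exact pvStrip_dec x d h

-- loop body: if x % d == 0: strip d from x; fold in r = (-a) % d
def pvStepB (a : Int) (s : Int × Option Int) (d : Nat) : Int × Option Int :=
  if PySem.Int.mod s.1 (d : Int) = 0 then
    (pvStrip s.1 (d : Int), pvUpd s.2 (PySem.Int.mod (-a) (d : Int)))
  else s

def pvSingleStepsAlt (n g : Int) : Int :=
  let x := g - n - 1
  let a := n + 1
  let s := (List.range' 2 (x.toNat.sqrt + 1 - 2)).foldl (pvStepB a) (x, none)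
  ((if 1 < s.1 then pvUpd s.2 (PySem.Int.mod (-a) s.1) else s.2).getD 0)

def pvLoopB (cap : Int) (fuel : Nat) (n g : Int) : Int :=
  match fuel with
  | 0 => g
  | fuel + 1 =>
    if n < cap then
      let step : Int := (Int.gcd (n + 1) g : Int)
      if 1 < step then pvLoopB cap fuel (n + 1) (g + step)
      else
        let x := min (cap - n) (pvSingleStepsAlt n g)
        pvLoopB cap fuel (n + x) (g + x)
    else g

def fast_g_alt (cap : Int) : Int := pvLoopB cap (cap.toNat + 1) 4 13

-- ===== PRECONDITION & SPEC =====
def Spec_fast_g (cap : Int) (out : Int) : Prop := out = fast_g_alt cap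
instance (cap : Int) (out : Int) : Decidable (Spec_fast_g cap out) := by unfold Spec_fast_g; infer_instance

-- ===== CLAIM (what is proved, stated in full; the proofs are below) =====
def Claim_equal_fast_g : Prop := ∀ (cap : Int), Dom_fast_g cap → Spec_fast_g cap (fast_g cap)

-- ===== LEMMAS AND PROOFS =====

theorem pvAdj_eq (a m : Int) (hm : 0 < m) : pvAdj a m = (-a) % m := by
  unfold pvAdj
  rw [PySem.Int.mod_eq_emod_of_pos hm, PySem.Int.mod_eq_emod_of_pos hm]
  have h1 : Int.ModEq m m 0 := by unfold Int.ModEq; simp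
  have h2 : Int.ModEq m (a % m) a := Int.emod_emod_of_dvd a (dvd_refl m)
  have h3 : (m - a % m) % m = (0 - a) % m := h1.sub h2
  simpa using h3

theorem pvAdj_nonneg (a m : Int) (hm : 0 < m) : 0 ≤ pvAdj a m := by
  rw [pvAdj_eq a m hm]; exact Int.emod_nonneg _ (by omega)

theorem pvAdj_lt (a m : Int) (hm : 0 < m) : pvAdj a m < m := by
  rw [pvAdj_eq a m hm]; exact Int.emod_lt_of_pos _ hm

theorem dvd_add_pvAdj (a m : Int) (hm : 0 < m) : m ∣ a + pvAdj a m := by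
  rw [pvAdj_eq a m hm, Int.emod_def]
  exact ⟨-((-a) / m), by ring⟩

theorem pvAdj_eq_zero_dvd (a m : Int) (hm : 0 < m) (h : pvAdj a m = 0) : m ∣ a := by
  rw [pvAdj_eq a m hm] at h
  exact (dvd_neg.mp (Int.dvd_of_emod_eq_zero h))

-- every element of the generator list divides x and is 1 or at least 2
theorem pvFactor_mem (x f : Int) (hx : 2 ≤ x) (hf : f ∈ pvFactor x) :
    f ∣ x ∧ (f = 1 ∨ 2 ≤ f) := by
  unfold pvFactor at hf
  simp only [List.mem_cons] at hf
  rcases hf with rfl | rfl | hf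
  · exact ⟨one_dvd x, Or.inl rfl⟩
  · exact ⟨dvd_refl f, Or.inr hx⟩
  obtain ⟨d, hd, hfd⟩ := List.mem_flatMap.mp hf
  rw [List.mem_range'_1] at hd
  obtain ⟨hd2, hdub⟩ := hd
  split at hfd
  · rename_i hmod
    have hdI : (2:Int) ≤ (d : Int) := by exact_mod_cast hd2
    rw [PySem.Int.mod_eq_emod_of_pos (by omega)] at hmod
    have hdvd : (d : Int) ∣ x := Int.dvd_of_emod_eq_zero hmod
    have hsle : (d : Int) ≤ ((x.toNat.sqrt : Nat) : Int) := by omega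
    have hdd : (d : Int) * (d : Int) ≤ x := by
      have h1 : d ≤ x.toNat.sqrt := by exact_mod_cast hsle
      have h2 := Nat.le_sqrt.mp h1
      have h3 : ((d * d : Nat) : Int) ≤ ((x.toNat : Nat) : Int) := by exact_mod_cast h2
      have h4 : ((x.toNat : Nat) : Int) = x := Int.toNat_of_nonneg (by omega)
      rw [h4] at h3
      exact_mod_cast h3
    obtain ⟨c, hc⟩ := hdvd
    have hfdiv : PySem.Int.floordiv x (d : Int) = c := by
      rw [PySem.Int.floordiv_eq_ediv_of_pos (by omega), hc,
        Int.mul_ediv_cancel_left _ (by omega)]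
    have hdc : (d : Int) ≤ c := by nlinarith
    simp only [List.mem_cons, List.not_mem_nil, or_false] at hfd
    rcases hfd with rfl | rfl
    · exact ⟨⟨c, hc⟩, Or.inr hdI⟩
    · rw [hfdiv]
      exact ⟨⟨(d : Int), by rw [hc]; ring⟩, Or.inr (by omega)⟩
  · simp at hfd

-- completeness: every divisor t with t*t ≤ x (t < x) is visited, yielding t and x//t
theorem pvFactor_pair_mem (x t f : Int) (hx : 2 ≤ x) (ht2 : 2 ≤ t) (htt : t * t ≤ x)
    (htx : t < x) (hdvd : t ∣ x) (hf : f = t ∨ f = PySem.Int.floordiv x t) :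
    f ∈ pvFactor x := by
  unfold pvFactor
  apply List.mem_cons_of_mem
  apply List.mem_cons_of_mem
  apply List.mem_flatMap.mpr
  have hcast : ((t.toNat : Nat) : Int) = t := Int.toNat_of_nonneg (by omega)
  refine ⟨t.toNat, ?_, ?_⟩
  · rw [List.mem_range'_1]
    have h1 : t.toNat ≤ x.toNat.sqrt := Nat.le_sqrt.mpr (by
      have h3 : ((t.toNat * t.toNat : Nat) : Int) ≤ ((x.toNat : Nat) : Int) := by
        push_cast
        rw [Int.toNat_of_nonneg (show (0:Int) ≤ x by omega)]
        rw [show ((t.toNat : Nat) : Int) = t from hcast]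
        exact htt
      exact_mod_cast h3)
    omega
  · rw [hcast, if_pos (by
      rw [PySem.Int.mod_eq_emod_of_pos (by omega)]
      exact Int.emod_eq_zero_of_dvd hdvd)]
    rcases hf with rfl | rfl <;> simp

theorem pvFactor_complete (x f : Int) (hx : 2 ≤ x) (hdvd : f ∣ x) (h1 : 1 ≤ f)
    (hfx : f ≤ x) : f ∈ pvFactor x := by
  rcases eq_or_lt_of_le h1 with rfl | hf1
  · unfold pvFactor; simp
  rcases eq_or_lt_of_le hfx with rfl | hfx'
  · unfold pvFactor; simp
  obtain ⟨c, hc⟩ := hdvd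
  have hcpos : 0 < c := by nlinarith
  have hc2 : 2 ≤ c := by
    rcases eq_or_lt_of_le (show (1:Int) ≤ c by omega) with h' | h'
    · exfalso; rw [← h'] at hc; omega
    · omega
  rcases le_or_gt (f * f) x with hsmall | hbig
  · exact pvFactor_pair_mem x f f hx (by omega) hsmall hfx' ⟨c, hc⟩ (Or.inl rfl)
  · have hcf : c < f := by nlinarith
    have hcc : c * c ≤ x := by nlinarith
    have hcx : c < x := by nlinarith
    have hfd : f = PySem.Int.floordiv x c := by
      rw [PySem.Int.floordiv_eq_ediv_of_pos hcpos, hc, Int.mul_ediv_cancel _ (by omega)]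
    exact pvFactor_pair_mem x c f hx hc2 hcc hcx ⟨f, by rw [hc]; ring⟩ (Or.inr hfd)


theorem gcd_gt_one_of_dvd (a x v f : Int) (hx : 0 < x) (hf2 : 2 ≤ f) (hfx : f ∣ x)
    (hfav : f ∣ a + v) : 1 < (Int.gcd (a + v) x : Int) := by
  have hcast : ((f.toNat : Int)) = f := Int.toNat_of_nonneg (by omega)
  have hdg : f.toNat ∣ Int.gcd (a + v) x :=
    Int.dvd_gcd (by rw [hcast]; exact hfav) (by rw [hcast]; exact hfx)
  have hne : Int.gcd (a + v) x ≠ 0 := by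
    intro h; rw [Int.gcd_eq_zero_iff] at h; omega
  have := Nat.le_of_dvd (Nat.pos_of_ne_zero hne) hdg
  omega

theorem key_exists (a x : Int) (hx : 2 ≤ x) (hco : Int.gcd a x = 1) :
    ∃ mn : Nat, 0 < mn ∧ 1 < (Int.gcd (a + (mn : Int)) x : Int) := by
  have hpp : (x.natAbs.minFac).Prime := Nat.minFac_prime (by omega)
  have hppos : (0:Int) < (x.natAbs.minFac : Int) := by exact_mod_cast hpp.pos
  have hpdx : ((x.natAbs.minFac : Int)) ∣ x :=
    (Int.natCast_dvd_natCast.mpr (Nat.minFac_dvd _)).trans (Int.natAbs_dvd.mpr dvd_rfl)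
  have hpa : ¬ ((x.natAbs.minFac : Int)) ∣ a := by
    intro h
    have h2 := Int.dvd_gcd h hpdx
    rw [hco] at h2
    have := Nat.le_of_dvd one_pos h2
    have := hpp.two_le
    omega
  have hk0 : 0 < pvAdj a (x.natAbs.minFac : Int) := by
    rcases eq_or_lt_of_le (pvAdj_nonneg a _ hppos) with h | h
    · exact absurd (pvAdj_eq_zero_dvd a _ hppos h.symm) hpa
    · exact h
  refine ⟨(pvAdj a (x.natAbs.minFac : Int)).toNat, by omega, ?_⟩
  rw [Int.toNat_of_nonneg (by omega)]
  exact gcd_gt_one_of_dvd a x _ _ (by omega) (by exact_mod_cast hpp.two_le) hpdx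
    (dvd_add_pvAdj a _ hppos)

theorem small_of_dvd (d t : Int) (hd : 0 < d) (hdvd : d ∣ t) (h0 : 0 ≤ t) (h1 : t < d) :
    t = 0 := by
  obtain ⟨q, rfl⟩ := hdvd
  rcases lt_trichotomy q 0 with h | h | h
  · nlinarith
  · rw [h]; ring
  · nlinarith

theorem key (a x : Int) (hx : 2 ≤ x) (hco : Int.gcd a x = 1) :
    ∃ m : Int, 1 ≤ m ∧ m < x ∧
      (PySem.List.min? (((pvFactor x).map (fun f => pvAdj a f)).filter
        (fun v => decide (0 < v))) (fun v => v)).getD 0 = m ∧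
      (∀ k : Int, 1 ≤ k → k < m → ¬ 1 < (Int.gcd (a + k) x : Int)) ∧
      1 < (Int.gcd (a + m) x : Int) := by
  obtain hex := key_exists a x hx hco
  obtain ⟨hm0pos, hm0P⟩ := Nat.find_spec hex
  have hmin : ∀ k : Int, 1 ≤ k → k < (Nat.find hex : Int) →
      ¬ 1 < (Int.gcd (a + k) x : Int) := by
    intro k hk1 hkm hPk
    have := Nat.find_min' hex (m := k.toNat)
      ⟨by omega, by rw [Int.toNat_of_nonneg (by omega)]; exact hPk⟩
    omega
  -- abbreviations for the minimum and the gcd at the minimum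
  have hm1 : (1:Int) ≤ (Nat.find hex : Int) := by exact_mod_cast hm0pos
  have hd1 : (1:Int) < (Int.gcd (a + (Nat.find hex : Int)) x : Int) := hm0P
  have hddx : ((Int.gcd (a + (Nat.find hex : Int)) x : Int)) ∣ x := Int.gcd_dvd_right _ _
  have hdam : ((Int.gcd (a + (Nat.find hex : Int)) x : Int)) ∣ a + (Nat.find hex : Int) :=
    Int.gcd_dvd_left _ _
  have hdx : ((Int.gcd (a + (Nat.find hex : Int)) x : Int)) ≤ x :=
    Int.le_of_dvd (by omega) hddx
  set m0 : Int := (Nat.find hex : Int) with hm0def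
  set d : Int := (Int.gcd (a + m0) x : Int) with hddef
  have hdpos : (0:Int) < d := by omega
  -- pvAdj a d is a positive event point below d, hence equals m0 by minimality
  have hadjnn := pvAdj_nonneg a d hdpos
  have hadjlt := pvAdj_lt a d hdpos
  have hadj0 : pvAdj a d ≠ 0 := by
    intro h
    have hda : d ∣ a := pvAdj_eq_zero_dvd a d hdpos h
    have h2 : d.toNat ∣ Int.gcd a x := Int.dvd_gcd
      (by rw [Int.toNat_of_nonneg (show (0:Int) ≤ d by omega)]; exact hda)
      (by rw [Int.toNat_of_nonneg (show (0:Int) ≤ d by omega)]; exact hddx)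
    rw [hco] at h2
    have := Nat.le_of_dvd one_pos h2
    omega
  have hadjP : 1 < (Int.gcd (a + pvAdj a d) x : Int) :=
    gcd_gt_one_of_dvd a x _ d (by omega) (by omega) hddx (dvd_add_pvAdj a d hdpos)
  have hm0adj : m0 ≤ pvAdj a d := by
    by_contra hlt
    exact hmin (pvAdj a d) (by omega) (by omega) hadjP
  have hadjeq : pvAdj a d = m0 := by
    have hsub : d ∣ (pvAdj a d - m0) := by
      have := (dvd_add_pvAdj a d hdpos).sub hdam
      simpa using this
    have := small_of_dvd d _ hdpos hsub (by omega) (by omega)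
    omega
  have hm0x : m0 < x := by omega
  -- so m0 is in A's candidate list (via the divisor d, which factor x produces)
  have hdmem : d ∈ pvFactor x := pvFactor_complete x d hx hddx (by omega) hdx
  have hm0mem : m0 ∈ ((pvFactor x).map (fun f => pvAdj a f)).filter
      (fun v => decide (0 < v)) := by
    rw [List.mem_filter]
    exact ⟨List.mem_map.mpr ⟨d, hdmem, hadjeq⟩, by simp; omega⟩
  -- every candidate is a positive event point, so the list minimum is exactly m0
  have hforward : ∀ v ∈ ((pvFactor x).map (fun f => pvAdj a f)).filter
      (fun v => decide (0 < v)), 1 ≤ v ∧ 1 < (Int.gcd (a + v) x : Int) := by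
    intro v hv
    rw [List.mem_filter] at hv
    obtain ⟨hv1, hv2⟩ := hv
    obtain ⟨f, hfm, rfl⟩ := List.mem_map.mp hv1
    simp only [decide_eq_true_eq] at hv2
    obtain ⟨hfdvd, hf1⟩ := pvFactor_mem x f hx hfm
    rcases hf1 with rfl | hf2
    · have h1 := pvAdj_lt a 1 one_pos
      have h2 := pvAdj_nonneg a 1 one_pos
      omega
    · exact ⟨by omega, gcd_gt_one_of_dvd a x _ f (by omega) hf2 hfdvd
        (dvd_add_pvAdj a f (by omega))⟩
  refine ⟨m0, hm1, hm0x, ?_, hmin, hd1⟩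
  cases hminq : PySem.List.min? (((pvFactor x).map (fun f => pvAdj a f)).filter
      (fun v => decide (0 < v))) (fun v => v) with
  | none =>
    rw [PySem.List.min?_eq_none_iff] at hminq
    rw [hminq] at hm0mem
    simp at hm0mem
  | some v =>
    obtain ⟨hv1, hvP⟩ := hforward v (PySem.List.min?_mem hminq)
    have hvm0 : v ≤ m0 := PySem.List.min?_isMin hminq m0 hm0mem
    have hm0v : m0 ≤ v := by
      by_contra hlt
      exact hmin v hv1 (by omega) hvP
    simp only [Option.getD_some]
    omega

-- ---- B side: correctness of the trial-division minimum ----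

def NoSmallDvd (q : Int) : Prop := ∀ e : Int, 2 ≤ e → e < q → ¬ e ∣ q

-- there is a prime p | x whose residue (-a) % p is exactly the least event point m
theorem keyB_witness (a x m : Int) (hx : 2 ≤ x) (hco : Int.gcd a x = 1)
    (hm1 : 1 ≤ m) (hP : 1 < (Int.gcd (a + m) x : Int))
    (hmin : ∀ k : Int, 1 ≤ k → k < m → ¬ 1 < (Int.gcd (a + k) x : Int)) :
    ∃ p : Int, 2 ≤ p ∧ p ∣ x ∧ NoSmallDvd p ∧ PySem.Int.mod (-a) p = m := by
  have hd2 : 2 ≤ Int.gcd (a + m) x := by exact_mod_cast hP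
  have hpp : ((Int.gcd (a + m) x).minFac).Prime := Nat.minFac_prime (by omega)
  set pN := (Int.gcd (a + m) x).minFac with hpN
  have hp2 : (2:Int) ≤ (pN : Int) := by exact_mod_cast hpp.two_le
  have hpd : ((pN : Int)) ∣ ((Int.gcd (a + m) x : Nat) : Int) :=
    Int.natCast_dvd_natCast.mpr (Nat.minFac_dvd _)
  have hpx : ((pN : Int)) ∣ x := hpd.trans (Int.gcd_dvd_right _ _)
  have hpam : ((pN : Int)) ∣ a + m := hpd.trans (Int.gcd_dvd_left _ _)
  have hnsd : NoSmallDvd (pN : Int) := by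
    intro e he1 he2 hdvd
    have heN : e.toNat ∣ pN := by
      have : ((e.toNat : Nat) : Int) ∣ (pN : Int) := by
        rw [Int.toNat_of_nonneg (by omega)]; exact hdvd
      exact_mod_cast this
    rcases (Nat.Prime.eq_one_or_self_of_dvd hpp _ heN) with h | h <;> omega
  refine ⟨(pN : Int), hp2, hpx, hnsd, ?_⟩
  have hmod : PySem.Int.mod (-a) (pN : Int) = pvAdj a (pN : Int) := by
    rw [pvAdj_eq a _ (by omega), PySem.Int.mod_eq_emod_of_pos (by omega)]
  rw [hmod]
  -- pvAdj a p is a positive event point ≤ m congruent to m mod p, so it equals m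
  have hann := pvAdj_nonneg a (pN : Int) (by omega)
  have halt := pvAdj_lt a (pN : Int) (by omega)
  have ha0 : pvAdj a (pN : Int) ≠ 0 := by
    intro h
    have hda : ((pN : Int)) ∣ a := pvAdj_eq_zero_dvd a _ (by omega) h
    have h2' : pN ∣ Int.gcd a x := Int.dvd_gcd
      (by exact_mod_cast hda) (by exact_mod_cast hpx)
    rw [hco] at h2'
    have := Nat.le_of_dvd one_pos h2'
    omega
  have haP : 1 < (Int.gcd (a + pvAdj a (pN : Int)) x : Int) :=
    gcd_gt_one_of_dvd a x _ (pN : Int) (by omega) hp2 hpx (dvd_add_pvAdj a _ (by omega))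
  have hma : m ≤ pvAdj a (pN : Int) := by
    by_contra hcon
    exact hmin _ (by omega) (by omega) haP
  have hsub : ((pN : Int)) ∣ (pvAdj a (pN : Int) - m) := by
    have := (dvd_add_pvAdj a (pN : Int) (by omega)).sub hpam
    simpa using this
  have := small_of_dvd (pN : Int) _ (by omega) hsub (by omega) (by omega)
  omega

theorem pvStrip_dvd (x d : Int) : pvStrip x d ∣ x := by
  rw [pvStrip]
  split
  · rename_i h
    have ih := pvStrip_dvd (PySem.Int.floordiv x d) d
    obtain ⟨h0, hd, hx⟩ := h
    rw [PySem.Int.mod_eq_emod_of_pos (by omega)] at h0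
    obtain ⟨c, hc⟩ := Int.dvd_of_emod_eq_zero h0
    have hfd : PySem.Int.floordiv x d = c := by
      rw [PySem.Int.floordiv_eq_ediv_of_pos (by omega), hc,
        Int.mul_ediv_cancel_left _ (by omega)]
    exact ih.trans (by rw [hfd]; exact ⟨d, by rw [hc]; ring⟩)
  · exact dvd_refl x
termination_by x.toNat
decreasing_by exact pvStrip_dec x d (by assumption)

theorem pvStrip_pos (x d : Int) (hx : 0 < x) (hd : 2 ≤ d) : 0 < pvStrip x d := by
  rw [pvStrip]
  split
  · rename_i h
    have h0 := h.1
    rw [PySem.Int.mod_eq_emod_of_pos (by omega)] at h0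
    obtain ⟨c, hc⟩ := Int.dvd_of_emod_eq_zero h0
    have hfd : PySem.Int.floordiv x d = c := by
      rw [PySem.Int.floordiv_eq_ediv_of_pos (by omega), hc,
        Int.mul_ediv_cancel_left _ (by omega)]
    have hcpos : 0 < c := by nlinarith
    exact pvStrip_pos (PySem.Int.floordiv x d) d (by rw [hfd]; exact hcpos) hd
  · exact hx
termination_by x.toNat
decreasing_by exact pvStrip_dec x d (by assumption)

theorem pvStrip_not_dvd (x d : Int) (hx : 0 < x) (hd : 2 ≤ d) : ¬ d ∣ pvStrip x d := by
  rw [pvStrip]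
  split
  · rename_i h
    have h0 := h.1
    rw [PySem.Int.mod_eq_emod_of_pos (by omega)] at h0
    obtain ⟨c, hc⟩ := Int.dvd_of_emod_eq_zero h0
    have hfd : PySem.Int.floordiv x d = c := by
      rw [PySem.Int.floordiv_eq_ediv_of_pos (by omega), hc,
        Int.mul_ediv_cancel_left _ (by omega)]
    have hcpos : 0 < c := by nlinarith
    exact pvStrip_not_dvd (PySem.Int.floordiv x d) d (by rw [hfd]; exact hcpos) hd
  · rename_i h
    intro hdvd
    apply h
    refine ⟨?_, hd, hx⟩
    rw [PySem.Int.mod_eq_emod_of_pos (by omega)]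
    exact Int.emod_eq_zero_of_dvd hdvd
termination_by x.toNat
decreasing_by exact pvStrip_dec x d (by assumption)

theorem pvStrip_keep (x d q : Int) (hq : IsCoprime q d) (hqx : q ∣ x) :
    q ∣ pvStrip x d := by
  rw [pvStrip]
  split
  · rename_i h
    have h0 := h.1
    have hd := h.2.1
    rw [PySem.Int.mod_eq_emod_of_pos (by omega)] at h0
    obtain ⟨c, hc⟩ := Int.dvd_of_emod_eq_zero h0
    have hfd : PySem.Int.floordiv x d = c := by
      rw [PySem.Int.floordiv_eq_ediv_of_pos (by omega), hc,
        Int.mul_ediv_cancel_left _ (by omega)]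
    have hqc : q ∣ c := hq.dvd_of_dvd_mul_left (by rw [← hc]; exact hqx)
    exact pvStrip_keep (PySem.Int.floordiv x d) d q hq (by rw [hfd]; exact hqc)
  · exact hqx
termination_by x.toNat
decreasing_by exact pvStrip_dec x d (by assumption)

-- the invariant carried through B's for-loop: the current x is a positive divisor
-- of the original with no factor below d, unprocessed primes still divide it, every
-- recorded residue is ≥ m, and either the witness prime was recorded or is upcoming
def BInv (a x m p : Int) (d : Int) (s : Int × Option Int) : Prop :=
  0 < s.1 ∧ s.1 ∣ x ∧
  (∀ e : Int, 2 ≤ e → e < d → ¬ e ∣ s.1) ∧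
  (∀ q : Int, q ∣ x → 2 ≤ q → NoSmallDvd q → d ≤ q → q ∣ s.1) ∧
  (∀ r : Int, s.2 = some r → m ≤ r) ∧
  ((∃ v, s.2 = some v ∧ v ≤ m) ∨ d ≤ p)

theorem BInv_step (a x m p : Int) (hx : 2 ≤ x) (hco : Int.gcd a x = 1)
    (hm1 : 1 ≤ m)
    (hmin : ∀ k : Int, 1 ≤ k → k < m → ¬ 1 < (Int.gcd (a + k) x : Int))
    (hpx : p ∣ x) (hpn : NoSmallDvd p)
    (hpm : PySem.Int.mod (-a) p = m) (d : Nat) (hd : 2 ≤ d)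
    (s : Int × Option Int) (hs : BInv a x m p (d : Int) s) :
    BInv a x m p ((d : Int) + 1) (pvStepB a s d) := by
  obtain ⟨x1, b1⟩ := s
  obtain ⟨h1, h2, h3, h4, h5, h6⟩ := hs
  have hdI : (2:Int) ≤ (d : Int) := by exact_mod_cast hd
  unfold pvStepB
  by_cases hmod : PySem.Int.mod x1 (d : Int) = 0
  · rw [if_pos hmod]
    simp only at h1 h2 h3 h4 h5 h6 ⊢
    have hdd : (d : Int) ∣ x1 := by
      rw [PySem.Int.mod_eq_emod_of_pos (by omega)] at hmod
      exact Int.dvd_of_emod_eq_zero hmod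
    have hddx : (d : Int) ∣ x := hdd.trans h2
    have hrdef : PySem.Int.mod (-a) (d : Int) = pvAdj a (d : Int) := by
      rw [pvAdj_eq a _ (by omega), PySem.Int.mod_eq_emod_of_pos (by omega)]
    have hrnn := pvAdj_nonneg a (d : Int) (by omega)
    have hr0 : pvAdj a (d : Int) ≠ 0 := by
      intro h
      have hda : (d : Int) ∣ a := pvAdj_eq_zero_dvd a _ (by omega) h
      have h2' : (d : Int).toNat ∣ Int.gcd a x := Int.dvd_gcd
        (by rw [Int.toNat_of_nonneg (by omega)]; exact hda)
        (by rw [Int.toNat_of_nonneg (by omega)]; exact hddx)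
      rw [hco] at h2'
      have := Nat.le_of_dvd one_pos h2'
      omega
    have hrP : 1 < (Int.gcd (a + pvAdj a (d : Int)) x : Int) :=
      gcd_gt_one_of_dvd a x _ (d : Int) (by omega) hdI hddx (dvd_add_pvAdj a _ (by omega))
    have hrm : m ≤ pvAdj a (d : Int) := by
      by_contra hcon
      exact hmin _ (by omega) (by omega) hrP
    refine ⟨pvStrip_pos _ _ h1 hdI, (pvStrip_dvd _ _).trans h2, ?_, ?_, ?_, ?_⟩
    · intro e he1 he2 hdvd'
      by_cases hed : e = (d : Int)
      · exact pvStrip_not_dvd _ _ h1 hdI (hed ▸ hdvd')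
      · exact h3 e he1 (by omega) (hdvd'.trans (pvStrip_dvd _ _))
    · intro q hq1 hq2 hq3 hq4
      have hqs : q ∣ x1 := h4 q hq1 hq2 hq3 (by omega)
      have hqd : Int.gcd q (d : Int) = 1 := by
        by_contra hG
        have hG0 : Int.gcd q (d : Int) ≠ 0 := by
          intro hz; rw [Int.gcd_eq_zero_iff] at hz; omega
        have hGq : ((Int.gcd q (d : Int) : Nat) : Int) ∣ q := Int.gcd_dvd_left _ _
        have hGd : ((Int.gcd q (d : Int) : Nat) : Int) ∣ (d : Int) := Int.gcd_dvd_right _ _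
        have hGled : ((Int.gcd q (d : Int) : Nat) : Int) ≤ (d : Int) :=
          Int.le_of_dvd (by omega) hGd
        exact hq3 _ (by omega) (by omega) hGq
      exact pvStrip_keep _ _ q (Int.isCoprime_iff_gcd_eq_one.mpr hqd) hqs
    · intro r hr
      rcases hb : b1 with _ | v
      · rw [hb] at hr
        simp only [pvUpd, Option.some_inj] at hr
        rw [← hr, hrdef]
        exact hrm
      · rw [hb] at hr
        simp only [pvUpd] at hr
        split_ifs at hr with hcase <;> rw [Option.some_inj] at hr <;> subst hr
        · rw [hrdef]; exact hrm
        · exact h5 v hb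
    · rcases h6 with ⟨v, hv, hvm⟩ | h6
      · left
        subst hv
        refine ⟨if PySem.Int.mod (-a) (d : Int) < v then PySem.Int.mod (-a) (d : Int)
                else v, ?_, ?_⟩
        · simp only [pvUpd]
          split_ifs <;> rfl
        · split_ifs with hcase
          · omega
          · exact hvm
      · by_cases hdp : (d : Int) = p
        · left
          have hrm' : PySem.Int.mod (-a) (d : Int) = m := by rw [hdp]; exact hpm
          rcases hb : b1 with _ | v
          · exact ⟨m, by simp [pvUpd, hrm'], le_refl m⟩
          · have hvm := h5 v hb
            refine ⟨if m < v then m else v, ?_, ?_⟩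
            · simp only [pvUpd, hrm']
              split_ifs <;> rfl
            · split_ifs <;> omega
        · right; omega
  · rw [if_neg hmod]
    simp only at h1 h2 h3 h4 h5 h6 ⊢
    have hnd : ¬ (d : Int) ∣ x1 := by
      intro hdd
      apply hmod
      rw [PySem.Int.mod_eq_emod_of_pos (by omega)]
      exact Int.emod_eq_zero_of_dvd hdd
    refine ⟨h1, h2, ?_, ?_, h5, ?_⟩
    · intro e he1 he2 hdvd'
      by_cases hed : e = (d : Int)
      · exact hnd (hed ▸ hdvd')
      · exact h3 e he1 (by omega) hdvd'
    · intro q hq1 hq2 hq3 hq4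
      exact h4 q hq1 hq2 hq3 (by omega)
    · rcases h6 with h6 | h6
      · exact Or.inl h6
      · right
        rcases eq_or_lt_of_le h6 with heq | hlt
        · exact absurd (heq ▸ h4 p hpx (by omega) hpn (by omega)) hnd
        · omega

theorem fold_inv (a x m p : Int) (hx : 2 ≤ x) (hco : Int.gcd a x = 1)
    (hm1 : 1 ≤ m)
    (hmin : ∀ k : Int, 1 ≤ k → k < m → ¬ 1 < (Int.gcd (a + k) x : Int))
    (hpx : p ∣ x) (hpn : NoSmallDvd p)
    (hpm : PySem.Int.mod (-a) p = m) :
    ∀ (k d : Nat) (s : Int × Option Int), 2 ≤ d → BInv a x m p (d : Int) s →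
      BInv a x m p ((d + k : Nat) : Int) ((List.range' d k).foldl (pvStepB a) s) := by
  intro k
  induction k with
  | zero => intro d s hd hs; simpa using hs
  | succ k ih =>
    intro d s hd hs
    rw [List.range'_succ, show d + (k + 1) = (d + 1) + k from by omega]
    simp only [List.foldl_cons]
    have hstep := BInv_step a x m p hx hco hm1 hmin hpx hpn hpm d hd s hs
    have hcast : ((d : Int) + 1) = (((d + 1 : Nat)) : Int) := by push_cast; ring
    rw [hcast] at hstep
    exact ih (d + 1) (pvStepB a s d) (by omega) hstep

-- B's whole single_steps body returns exactly the least event point m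
theorem keyB (n g m : Int) (hx : 2 ≤ g - n - 1)
    (hco : Int.gcd (n + 1) (g - n - 1) = 1) (hm1 : 1 ≤ m)
    (hP : 1 < (Int.gcd ((n + 1) + m) (g - n - 1) : Int))
    (hmin : ∀ k : Int, 1 ≤ k → k < m → ¬ 1 < (Int.gcd ((n + 1) + k) (g - n - 1) : Int)) :
    pvSingleStepsAlt n g = m := by
  obtain ⟨p, hp2, hpx, hpn, hpm⟩ :=
    keyB_witness (n + 1) (g - n - 1) m hx hco hm1 hP hmin
  unfold pvSingleStepsAlt
  set a := n + 1 with hadef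
  set x := g - n - 1 with hxdef
  have hs1 : 1 ≤ x.toNat.sqrt := Nat.le_sqrt.mpr (by omega)
  have hinit : BInv a x m p ((2 : Nat) : Int) (x, none) := by
    refine ⟨by omega, dvd_refl x, ?_, ?_, by simp, Or.inr (by exact_mod_cast hp2)⟩
    · intro e he1 he2 _
      have : ((2:Nat) : Int) = (2 : Int) := by norm_num
      omega
    · intro q hq _ _ _
      exact hq
  have hfin := fold_inv a x m p hx hco hm1 hmin hpx hpn hpm
    (x.toNat.sqrt + 1 - 2) 2 (x, none) (le_refl 2) hinit
  rw [show 2 + (x.toNat.sqrt + 1 - 2) = x.toNat.sqrt + 1 from by omega] at hfin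
  set s := (List.range' 2 (x.toNat.sqrt + 1 - 2)).foldl (pvStepB a) (x, none) with hsdef
  show (if 1 < s.1 then pvUpd s.2 (PySem.Int.mod (-a) s.1) else s.2).getD 0 = m
  obtain ⟨hf1, hf2, hf3, hf4, hf5, hf6⟩ := hfin
  have hDge : ((x.toNat.sqrt + 1 : Nat) : Int) = (x.toNat.sqrt : Int) + 1 := by push_cast; ring
  rw [hDge] at hf3 hf4 hf6
  -- no divisor u of s.1 with 2 ≤ u and u*u ≤ x survives the loop
  have hnosmall : ∀ u : Int, 2 ≤ u → u * u ≤ x → ¬ u ∣ s.1 := by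
    intro u hu2 huu hdvd
    have huN : u.toNat ≤ x.toNat.sqrt := Nat.le_sqrt.mpr (by
      have h3 : ((u.toNat * u.toNat : Nat) : Int) ≤ ((x.toNat : Nat) : Int) := by
        push_cast
        rw [Int.toNat_of_nonneg (show (0:Int) ≤ u by omega),
          Int.toNat_of_nonneg (show (0:Int) ≤ x by omega)]
        exact huu
      exact_mod_cast h3)
    have huI : u ≤ (x.toNat.sqrt : Int) := by omega
    exact hf3 u hu2 (by omega) hdvd
  -- any residue of a divisor f ≥ 2 of x is at least m
  have hresge : ∀ f : Int, 2 ≤ f → f ∣ x → m ≤ PySem.Int.mod (-a) f := by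
    intro f hf2 hfx
    have hrdef : PySem.Int.mod (-a) f = pvAdj a f := by
      rw [pvAdj_eq a _ (by omega), PySem.Int.mod_eq_emod_of_pos (by omega)]
    rw [hrdef]
    have hrnn := pvAdj_nonneg a f (by omega)
    have hr0 : pvAdj a f ≠ 0 := by
      intro h
      have hda : f ∣ a := pvAdj_eq_zero_dvd a _ (by omega) h
      have h2' : f.toNat ∣ Int.gcd a x := Int.dvd_gcd
        (by rw [Int.toNat_of_nonneg (by omega)]; exact hda)
        (by rw [Int.toNat_of_nonneg (by omega)]; exact hfx)
      rw [hco] at h2'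
      have := Nat.le_of_dvd one_pos h2'
      omega
    have hrP : 1 < (Int.gcd (a + pvAdj a f) x : Int) :=
      gcd_gt_one_of_dvd a x _ f (by omega) hf2 hfx (dvd_add_pvAdj a _ (by omega))
    by_contra hcon
    exact hmin _ (by omega) (by omega) hrP
  rcases hf6 with ⟨v, hv, hvm⟩ | hDp
  · have hveq : v = m := le_antisymm hvm (hf5 v hv)
    subst hveq
    by_cases hbig : 1 < s.1
    · rw [if_pos hbig, hv]
      have hge := hresge s.1 (by omega) hf2
      simp only [pvUpd]
      split_ifs with hcase
      · omega
      · simp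
    · rw [if_neg hbig, hv]
      simp
  · have hps : p ∣ s.1 := hf4 p hpx (by omega) hpn hDp
    have hple : p ≤ s.1 := Int.le_of_dvd hf1 hps
    have hsp : s.1 = p := by
      by_contra hne
      obtain ⟨c, hc⟩ := hps
      have hcpos : 0 < c := by nlinarith
      have hc2 : 2 ≤ c := by
        rcases eq_or_lt_of_le (show (1:Int) ≤ c by omega) with h' | h'
        · exfalso; rw [← h'] at hc; omega
        · omega
      have hsx : s.1 ≤ x := Int.le_of_dvd (by omega) hf2
      have hu2 : 2 ≤ min p c := le_min (by omega) hc2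
      have huu : min p c * min p c ≤ x := by
        nlinarith [min_le_left p c, min_le_right p c]
      refine hnosmall (min p c) hu2 huu ?_
      rcases min_cases p c with ⟨hm', _⟩ | ⟨hm', _⟩ <;> rw [hm']
      · exact ⟨c, hc⟩
      · exact ⟨p, by rw [hc]; ring⟩
    rw [if_pos (by omega), hsp, hpm]
    rcases hb : s.2 with _ | v
    · simp [pvUpd]
    · have hvm := hf5 v hb
      simp only [pvUpd]
      split_ifs with hcase
      · simp
      · simp
        omega

-- the heart: on coprime states both helpers compute the least k ≥ 1 with gcd(a+k, x) > 1
theorem single_steps_eq (n g : Int) (hg : 9 ≤ g - n)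
    (hco : Int.gcd (n + 1) (g - n - 1) = 1) :
    pvSingleSteps n g = pvSingleStepsAlt n g ∧ 1 ≤ pvSingleSteps n g := by
  obtain ⟨m, hm1, hmx, hA, hmin, hP⟩ := key (n + 1) (g - n - 1) (by omega) hco
  unfold pvSingleSteps
  refine ⟨?_, by rw [hA]; omega⟩
  rw [hA, keyB n g m (by omega) hco hm1 hP hmin]


theorem loop_eq (cap : Int) : ∀ (fuel : Nat) (n g : Int), 4 ≤ n → 9 ≤ g - n →
    pvLoopA cap fuel n g = pvLoopB cap fuel n g := by
  intro fuel
  induction fuel with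
  | zero => intro n g _ _; rfl
  | succ f ih =>
    intro n g hn hg
    rw [pvLoopA, pvLoopB]
    by_cases hcap : n < cap
    · rw [if_pos hcap, if_pos hcap]
      by_cases hstep : (1:Int) < (Int.gcd (n + 1) g : Int)
      · rw [if_pos hstep, if_pos hstep]
        exact ih (n + 1) (g + (Int.gcd (n + 1) g : Int)) (by omega) (by omega)
      · rw [if_neg hstep, if_neg hstep]
        have hgcd : Int.gcd (n + 1) g = 1 := by
          have hne : Int.gcd (n + 1) g ≠ 0 := by
            intro h; rw [Int.gcd_eq_zero_iff] at h; omega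
          omega
        have hco : Int.gcd (n + 1) (g - n - 1) = 1 := by
          have h1 : IsCoprime (n + 1 : Int) g := Int.isCoprime_iff_gcd_eq_one.mpr hgcd
          have h3 := h1.add_mul_left_right (-1)
          rw [show g + (n + 1) * (-1) = g - n - 1 by ring] at h3
          exact Int.isCoprime_iff_gcd_eq_one.mp h3
        obtain ⟨heq, hpos⟩ := single_steps_eq n g hg hco
        rw [← heq]
        have hmin1 : 1 ≤ min (cap - n) (pvSingleSteps n g) :=
          le_min (by omega) hpos
        exact ih (n + min (cap - n) (pvSingleSteps n g))
          (g + min (cap - n) (pvSingleSteps n g)) (by omega) (by omega)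
    · rw [if_neg hcap, if_neg hcap]

-- ===== VERDICT (by name: the statement is the Claim_ definition above) =====
theorem fast_g_spec : Claim_equal_fast_g := by
  intro cap _
  unfold Spec_fast_g fast_g fast_g_alt
  exact loop_eq cap _ 4 13 (by norm_num) (by norm_num)
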